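-- pv_equiv track=rewrite | github.com/Jeff-Clapper/algos | python/algos.py | solution
-- ===== SOURCE A (Python) =====
-- def solution(A):
--     value = A[0]
--     flipped = 0
--     kept = 0
--     for ind in range(len(A)):
--         if ind % 2 == 1:
--             if A[ind] == value:
--                 kept+=1
--             else:
--                 flipped+=1
--         else:
--             if A[ind] == value:
--                 flipped+=1
--             else:
--                 kept+=1
--
--     return min(flipped,kept)
-- ===== SOURCE B (Python) =====
-- def solution(A):
--     value = A[0]
--     n = len(A)
--     flipped = 0
--     i = 0
--     while i + 1 < n:
--         flipped += (A[i] == value) + (A[i + 1] != value)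
--         i += 2
--     if i < n:
--         flipped += (A[i] == value)
--     return min(flipped, n - flipped)
-- ===== Notes on version B (the rewrite author's own statement) =====
-- stated objective: alternative
-- what changed: B walks the array two positions per step with a single flip counter (cost of forcing the pattern that keeps the first element off the even slots), derives the kept count arithmetically as n - flipped, and returns the minimum of flipped and n - flipped, instead of A's per-index parity-branched loop maintaining two interleaved counters; Pre_ excludes the empty list, on which both raise IndexError.
import Mathlib
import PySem

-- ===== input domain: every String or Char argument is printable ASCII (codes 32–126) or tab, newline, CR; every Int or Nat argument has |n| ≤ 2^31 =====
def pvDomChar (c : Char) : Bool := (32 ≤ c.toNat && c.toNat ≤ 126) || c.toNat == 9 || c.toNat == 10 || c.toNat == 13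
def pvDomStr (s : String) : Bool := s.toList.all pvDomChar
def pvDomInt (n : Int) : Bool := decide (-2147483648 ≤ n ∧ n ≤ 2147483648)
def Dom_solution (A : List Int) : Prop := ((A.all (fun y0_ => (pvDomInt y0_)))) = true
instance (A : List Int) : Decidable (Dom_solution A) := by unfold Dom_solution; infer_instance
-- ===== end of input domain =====

-- B walks the array two positions per step with a single flip counter and derives kept as n minus flipped;
-- A keeps two interleaved parity-branched counters. Equivalence of return values is proved on nonempty lists.

-- ===== PORT A =====
def solution (A : List Int) : Int :=
  let value := (PySem.List.pyGet? A 0).getD 0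
  let st := (PySem.List.pyRange 0 (PySem.List.len A)).foldl
    (fun (st : Int × Int) ind =>
      if PySem.Int.mod ind 2 == 1 then
        if PySem.List.pyGetD A ind 0 == value then (st.1, st.2 + 1) else (st.1 + 1, st.2)
      else
        if PySem.List.pyGetD A ind 0 == value then (st.1 + 1, st.2) else (st.1, st.2 + 1))
    (0, 0)
  min st.1 st.2

-- ===== PORT B =====
-- the while loop of Source B: returns (final i, final flipped)
def solutionAltLoop (A : List Int) (value : Int) (i : Nat) (acc : Int) : Nat × Int :=
  if i + 1 < A.length then
    solutionAltLoop A value (i + 2)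
      (acc + (if A.getD i 0 == value then 1 else 0) + (if A.getD (i + 1) 0 != value then 1 else 0))
  else (i, acc)
termination_by A.length - i

def solution_alt (A : List Int) : Int :=
  let value := (PySem.List.pyGet? A 0).getD 0
  let n : Int := PySem.List.len A
  let r := solutionAltLoop A value 0 0
  let flipped := if (r.1 : Int) < n then r.2 + (if A.getD r.1 0 == value then 1 else 0) else r.2
  min flipped (n - flipped)

-- ===== PRECONDITION & SPEC =====
-- Pre_ excludes only the empty list, on which Python A raises IndexError reading the first element.
def Pre_solution (A : List Int) : Prop := A ≠ []
instance (A : List Int) : Decidable (Pre_solution A) := by unfold Pre_solution; infer_instance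
def pvWitness_solution : List Int := [1, 2, 1, 1]

def Spec_solution (A : List Int) (out : Int) : Prop := out = solution_alt A
instance (A : List Int) (out : Int) : Decidable (Spec_solution A out) := by unfold Spec_solution; infer_instance

-- ===== CLAIM (what is proved, stated in full; the proofs are below) =====
def Claim_equal_solution : Prop := ∀ (A : List Int), Dom_solution A → Pre_solution A → Spec_solution A (solution A)

-- ===== LEMMAS AND PROOFS =====

-- number of flips needed to reach the pattern that avoids v on even slots (0-based)
def flipCount (v : Int) : List Int → Int
  | [] => 0
  | [x] => if x = v then 1 else 0
  | x :: y :: t => (if x = v then 1 else 0) + (if y = v then 0 else 1) + flipCount v t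

-- A's loop body as a function of (index, element)
def stepA (v : Int) (st : Int × Int) (p : Int × Int) : Int × Int :=
  if PySem.Int.mod p.1 2 == 1 then
    if p.2 == v then (st.1, st.2 + 1) else (st.1 + 1, st.2)
  else
    if p.2 == v then (st.1 + 1, st.2) else (st.1, st.2 + 1)

theorem stepA_even (v : Int) (st : Int × Int) (m : Nat) (x : Int) :
    stepA v st (2 * (m : Int), x) = if x = v then (st.1 + 1, st.2) else (st.1, st.2 + 1) := by
  simp [stepA, PySem.Int.mod, beq_iff_eq]

theorem stepA_odd (v : Int) (st : Int × Int) (m : Nat) (y : Int) :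
    stepA v st (2 * (m : Int) + 1, y) = if y = v then (st.1, st.2 + 1) else (st.1 + 1, st.2) := by
  simp [stepA, PySem.Int.mod, beq_iff_eq]

-- A's fold over consecutive indices, started at an even index, counts exactly (flipCount, length - flipCount)
theorem foldA_eq (v : Int) : ∀ (t : List Int) (m : Nat) (f k : Int),
    (PySem.List.enumerate t (2 * (m : Int))).foldl (stepA v) (f, k)
      = (f + flipCount v t, k + (t.length - flipCount v t))
  | [], m, f, k => by simp [PySem.List.enumerate_nil, flipCount]
  | [x], m, f, k => by
    simp only [PySem.List.enumerate_cons, PySem.List.enumerate_nil, List.foldl_cons,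
      List.foldl_nil, stepA_even, flipCount, List.length]
    by_cases hx : x = v <;> simp [hx]
  | x :: y :: t, m, f, k => by
    have h2 : (2 : Int) * (m : Int) + 1 + 1 = 2 * ((m + 1 : Nat) : Int) := by push_cast; ring
    simp only [PySem.List.enumerate_cons, List.foldl_cons, stepA_even, flipCount, List.length]
    rw [h2]
    by_cases hx : x = v <;> by_cases hy : y = v <;>
      simp only [hx, hy, if_pos, if_neg, not_false_iff, stepA_odd] <;>
      rw [foldA_eq v t (m + 1)] <;> simp [Prod.mk.injEq] <;> omega

-- B's while loop (plus its trailing odd-element fixup) also computes flipCount of the tail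
theorem altLoop_eq (A : List Int) (v : Int) (i : Nat) (acc : Int) :
    (if ((solutionAltLoop A v i acc).1 : Int) < PySem.List.len A then
        (solutionAltLoop A v i acc).2 +
          (if A.getD (solutionAltLoop A v i acc).1 0 == v then 1 else 0)
      else (solutionAltLoop A v i acc).2)
      = acc + flipCount v (A.drop i) := by
  rw [solutionAltLoop]
  split
  · next h =>
    have hi : i < A.length := by omega
    have hd : A.drop i = A[i] :: A.drop (i + 1) := List.drop_eq_getElem_cons hi
    have hd2 : A.drop (i + 1) = A[i + 1] :: A.drop (i + 2) := List.drop_eq_getElem_cons h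
    have hg1 : A.getD i 0 = A[i] := List.getD_eq_getElem A 0 hi
    have hg2 : A.getD (i + 1) 0 = A[i + 1] := List.getD_eq_getElem A 0 h
    rw [altLoop_eq A v (i + 2), hd, hd2, hg1, hg2, flipCount]
    by_cases hx : A[i] = v <;> by_cases hy : A[i + 1] = v <;> simp [hx, hy] <;> ring
  · next h =>
    simp only [PySem.List.len]
    by_cases hi : i < A.length
    · have hi1 : i + 1 = A.length := by omega
      have hd : A.drop i = A[i] :: A.drop (i + 1) := List.drop_eq_getElem_cons hi
      have hg1 : A.getD i 0 = A[i] := List.getD_eq_getElem A 0 hi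
      have hd1 : A.drop (i + 1) = [] := List.drop_eq_nil_of_le (by omega)
      rw [hd, hd1, hg1]
      simp only [flipCount]
      by_cases hx : A[i] = v <;> simp [hx, hi]
    · have hd : A.drop i = [] := List.drop_eq_nil_of_le (by omega)
      simp [hd, flipCount, hi]
termination_by A.length - i

-- ===== VERDICT (by name: the statement is the Claim_ definition above) =====
theorem solution_spec : Claim_equal_solution := by
  intro A _ _
  show solution A = solution_alt A
  unfold solution solution_alt
  dsimp only
  have hA := foldA_eq ((PySem.List.pyGet? A 0).getD 0) A 0 0 0
  simp only [Nat.cast_zero, mul_zero, zero_add] at hA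
  rw [PySem.List.enumerate_eq_map_pyRange A 0, List.foldl_map] at hA
  simp only [stepA] at hA
  rw [hA]
  have hB := altLoop_eq A ((PySem.List.pyGet? A 0).getD 0) 0 0
  simp only [List.drop_zero, zero_add] at hB
  rw [hB]
  simp only [PySem.List.len]
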